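-- pv_equiv track=rewrite | github.com/SK1995/tp_reader_api | views.py | argument_checker
-- ===== SOURCE A (Python) =====
-- def argument_checker(dict_of_given_arguments, list_of_required_arguments, list_of_unrequired_arguments=None):
--     if list_of_unrequired_arguments is None:
--         list_of_unrequired_arguments = []
--     required_arguments_number_counter = 0
--     if dict_of_given_arguments and len(dict_of_given_arguments) <= (
--                 len(list_of_required_arguments) + len(list_of_unrequired_arguments)):
--         for arg in dict_of_given_arguments:
--             if arg not in list_of_required_arguments and arg not in list_of_unrequired_arguments:
--                 return False
--             if arg not in list_of_required_arguments and arg in list_of_unrequired_arguments: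
--                 continue
--             if arg in list_of_required_arguments and arg not in list_of_unrequired_arguments:
--                 required_arguments_number_counter += 1
--         if (required_arguments_number_counter == len(list_of_required_arguments)):
--             return True
--     return False
-- ===== SOURCE B (Python) =====
-- def argument_checker(dict_of_given_arguments, list_of_required_arguments, list_of_unrequired_arguments=None):
--     unrequired_list = list_of_unrequired_arguments if list_of_unrequired_arguments is not None else []
--     if not dict_of_given_arguments or len(dict_of_given_arguments) > (
--             len(list_of_required_arguments) + len(unrequired_list)):
--         return False
--     given = set(dict_of_given_arguments)
--     required = set(list_of_required_arguments)
--     unrequired = set(unrequired_list)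
--     if not given <= (required | unrequired):
--         return False
--     return len(given & (required - unrequired)) == len(list_of_required_arguments)
-- ===== Notes on version B (the rewrite author's own statement) =====
-- stated objective: simpler
-- what changed: Replaces A's per-key loop with three membership branches and a running counter by set algebra: one subset test given <= required|unrequired plus comparing len(given & (required - unrequired)) to the required list's length.
import Mathlib
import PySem

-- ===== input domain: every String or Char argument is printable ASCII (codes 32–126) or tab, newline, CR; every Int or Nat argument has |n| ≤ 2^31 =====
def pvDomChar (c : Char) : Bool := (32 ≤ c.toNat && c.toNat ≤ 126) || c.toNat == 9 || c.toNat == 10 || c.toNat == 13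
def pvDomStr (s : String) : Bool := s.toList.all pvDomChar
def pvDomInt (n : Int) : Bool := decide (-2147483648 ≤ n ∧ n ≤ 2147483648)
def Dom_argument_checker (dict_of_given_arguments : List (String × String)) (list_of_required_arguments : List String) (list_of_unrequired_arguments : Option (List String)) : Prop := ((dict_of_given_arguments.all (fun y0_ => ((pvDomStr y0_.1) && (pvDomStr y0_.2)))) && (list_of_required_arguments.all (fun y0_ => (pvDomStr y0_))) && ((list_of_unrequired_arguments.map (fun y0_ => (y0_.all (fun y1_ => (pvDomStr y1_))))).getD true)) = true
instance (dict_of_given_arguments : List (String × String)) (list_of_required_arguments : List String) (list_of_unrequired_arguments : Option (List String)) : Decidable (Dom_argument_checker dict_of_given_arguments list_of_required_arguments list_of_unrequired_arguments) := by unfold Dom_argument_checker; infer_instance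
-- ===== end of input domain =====

-- B replaces A's per-key three-way membership loop with one pass of set algebra
-- (subset test plus the size of given ∩ (required − unrequired)); objective: simpler.

-- ===== PORT A =====
-- the for-loop over the dict's keys, with the counter as accumulator; early `return False` = first branch
def argcheckLoopA (ks req unreq : List String) (c : Nat) : Bool :=
  match ks with
  | [] => decide (c = req.length)
  | k :: ks' =>
    if !(req.contains k) && !(unreq.contains k) then false
    else if !(req.contains k) && unreq.contains k then argcheckLoopA ks' req unreq c
    else if req.contains k && !(unreq.contains k) then argcheckLoopA ks' req unreq (c + 1)
    else argcheckLoopA ks' req unreq c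

def argument_checker (dict_of_given_arguments : List (String × String)) (list_of_required_arguments : List String) (list_of_unrequired_arguments : Option (List String)) : Bool :=
  let unreq := list_of_unrequired_arguments.getD []
  if !dict_of_given_arguments.isEmpty &&
      decide (dict_of_given_arguments.length ≤ list_of_required_arguments.length + unreq.length) then
    argcheckLoopA (dict_of_given_arguments.map Prod.fst) list_of_required_arguments unreq 0
  else false

-- ===== PORT B =====
def argument_checker_alt (dict_of_given_arguments : List (String × String)) (list_of_required_arguments : List String) (list_of_unrequired_arguments : Option (List String)) : Bool :=
  let unrequired_list := list_of_unrequired_arguments.getD []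
  if dict_of_given_arguments.isEmpty ||
      decide (list_of_required_arguments.length + unrequired_list.length < dict_of_given_arguments.length) then
    false
  else
    let given : PySem.Set String := PySem.Set.ofList (dict_of_given_arguments.map Prod.fst)
    let required : PySem.Set String := PySem.Set.ofList list_of_required_arguments
    let unrequired : PySem.Set String := PySem.Set.ofList unrequired_list
    if !(PySem.Set.issubset given (PySem.Set.union required unrequired)) then false
    else decide (PySem.Set.len (PySem.Set.inter given (PySem.Set.diff required unrequired)) = (list_of_required_arguments.length : Int))

-- ===== PRECONDITION & SPEC =====
-- Pre_ only states the Python-dict data invariant: the association list's keys are distinct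
-- (a Python dict can never present duplicate keys); it excludes no input the Python A accepts.
def Pre_argument_checker (dict_of_given_arguments : List (String × String)) (list_of_required_arguments : List String) (list_of_unrequired_arguments : Option (List String)) : Prop :=
  (dict_of_given_arguments.map Prod.fst).Nodup

instance (dict_of_given_arguments : List (String × String)) (list_of_required_arguments : List String) (list_of_unrequired_arguments : Option (List String)) : Decidable (Pre_argument_checker dict_of_given_arguments list_of_required_arguments list_of_unrequired_arguments) := by unfold Pre_argument_checker; infer_instance

def pvWitness_argument_checker : (List (String × String)) × List String × Option (List String) :=
  ([("a", "1"), ("b", "2")], ["a", "b"], some ["c"])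

def Spec_argument_checker (dict_of_given_arguments : List (String × String)) (list_of_required_arguments : List String) (list_of_unrequired_arguments : Option (List String)) (out : Bool) : Prop := out = argument_checker_alt dict_of_given_arguments list_of_required_arguments list_of_unrequired_arguments
instance (dict_of_given_arguments : List (String × String)) (list_of_required_arguments : List String) (list_of_unrequired_arguments : Option (List String)) (out : Bool) : Decidable (Spec_argument_checker dict_of_given_arguments list_of_required_arguments list_of_unrequired_arguments out) := by unfold Spec_argument_checker; infer_instance

-- ===== CLAIM (what is proved, stated in full; the proofs are below) =====
def Claim_equal_argument_checker : Prop := ∀ (dict_of_given_arguments : List (String × String)) (list_of_required_arguments : List String) (list_of_unrequired_arguments : Option (List String)), Dom_argument_checker dict_of_given_arguments list_of_required_arguments list_of_unrequired_arguments → Pre_argument_checker dict_of_given_arguments list_of_required_arguments list_of_unrequired_arguments → Spec_argument_checker dict_of_given_arguments list_of_required_arguments list_of_unrequired_arguments (argument_checker dict_of_given_arguments list_of_required_arguments list_of_unrequired_arguments)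

-- ===== LEMMAS AND PROOFS =====

-- A's loop, characterised: all keys lie in req ∪ unreq, and the counter reaches req.length.
theorem argcheckLoopA_eq (ks req unreq : List String) (c : Nat) :
    argcheckLoopA ks req unreq c =
      (ks.all (fun k => req.contains k || unreq.contains k) &&
       decide (c + (ks.filter (fun k => req.contains k && !(unreq.contains k))).length = req.length)) := by
  induction ks generalizing c with
  | nil => simp [argcheckLoopA]
  | cons k ks' ih =>
    by_cases h1 : k ∈ req <;> by_cases h2 : k ∈ unreq <;>
      simp [argcheckLoopA, ih, List.all_cons, List.filter_cons, h1, h2] <;>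
      (try exact congrArg _ (by rw [decide_eq_decide]; omega))

theorem argument_checker_spec_aux (d : List (String × String)) (req : List String) (unreqO : Option (List String))
    (hnd : (d.map Prod.fst).Nodup) :
    argument_checker d req unreqO = argument_checker_alt d req unreqO := by
  unfold argument_checker argument_checker_alt
  set unreq := unreqO.getD [] with hunreq
  set ks := d.map Prod.fst with hks
  by_cases he : d.isEmpty
  · simp [he]
  · by_cases hlen : d.length ≤ req.length + unreq.length
    · have hlen' : ¬ (req.length + unreq.length < d.length) := by omega
      simp only [he, hlen, hlen', Bool.not_false, decide_true, decide_false, Bool.true_and,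
        Bool.false_or, if_true, if_false, Bool.and_true]
      rw [argcheckLoopA_eq]
      rw [PySem.Set.ofList_eq_self_of_nodup _ hnd]
      -- membership conditions line up pointwise
      have hmem : ∀ k : String,
          (PySem.Set.contains (PySem.Set.union (PySem.Set.ofList req) (PySem.Set.ofList unreq)) k)
            = (req.contains k || unreq.contains k) := by
        intro k
        by_cases h1 : k ∈ req <;> by_cases h2 : k ∈ unreq <;>
          simp [PySem.Set.contains_iff, PySem.Set.mem_union, PySem.Set.mem_ofList,
            List.contains_iff_mem, h1, h2]
      have hmem2 : ∀ k : String,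
          (PySem.Set.contains (PySem.Set.diff (PySem.Set.ofList req) (PySem.Set.ofList unreq)) k)
            = (req.contains k && !(unreq.contains k)) := by
        intro k
        by_cases h1 : k ∈ req <;> by_cases h2 : k ∈ unreq <;>
          simp [PySem.Set.contains_iff, PySem.Set.mem_diff, PySem.Set.mem_ofList,
            List.contains_iff_mem, h1, h2]
      have hsub : PySem.Set.issubset ks (PySem.Set.union (PySem.Set.ofList req) (PySem.Set.ofList unreq))
          = ks.all (fun k => req.contains k || unreq.contains k) := by
        exact congrArg (fun f => ks.all f) (funext hmem)
      have hint : PySem.Set.inter ks (PySem.Set.diff (PySem.Set.ofList req) (PySem.Set.ofList unreq))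
          = ks.filter (fun k => req.contains k && !(unreq.contains k)) := by
        exact congrArg (fun f => ks.filter f) (funext hmem2)
      rw [hsub, hint]
      by_cases hall : ks.all (fun k => req.contains k || unreq.contains k) = true
      · simp only [hall, Bool.true_and, Bool.not_true, if_false, PySem.Set.len, decide_eq_true_eq,
          if_neg (by simp : ¬ (false = true))]
        rw [decide_eq_decide]
        omega
      · simp only [Bool.not_eq_true] at hall
        rw [hall]
        simp
    · have hlen' : req.length + unreq.length < d.length := by omega
      simp [he, hlen, hlen']

-- ===== VERDICT (by name: the statement is the Claim_ definition above) =====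
theorem argument_checker_spec : Claim_equal_argument_checker := by
  intro d req unreqO _ hpre
  exact argument_checker_spec_aux d req unreqO hpre
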